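-- pv_equiv track=rewrite | github.com/oktaviany10/TTG-Overview | soal 4/formulaPerhitungan.py | find_formula
-- ===== SOURCE A (Python) =====
-- from itertools import permutations
--
-- def generate(nums):
--     if len(nums) == 1:
--         yield str(nums[0]), nums[0]
--         return
--
--     for i in range(1, len(nums)):
--         left = nums[:i]
--         right = nums[i:]
--
--         for exp1, val1 in generate(left):
--             for exp2, val2 in generate(right):
--                 yield f"({exp1} + {exp2})", val1 + val2
--                 yield f"({exp1} - {exp2})", val1 - val2
--                 yield f"({exp1} * {exp2})", val1 * val2
--
-- def find_formula(nums, target):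
--     for perm in permutations(nums):
--         for exp, val in generate(list(perm)):
--             if val == target:
--                 # Bersihkan kurung luar
--                 if exp.startswith("(") and exp.endswith(")"):
--                     exp = exp[1:-1]
--                 return exp
--     return "Tidak ada formula yang cocok."
-- ===== SOURCE B (Python) =====
-- from itertools import permutations
--
-- def find_formula(nums, target):
--     for perm in permutations(nums):
--         xs = list(perm)
--         n = len(xs)
--         # rows[L-1][i] holds the (expr, value) pairs for the slice xs[i:i+L],
--         # built bottom-up instead of by recursive generators.
--         rows = [[[(str(x), x)] for x in xs]]
--         for L in range(2, n + 1):
--             row = []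
--             for i in range(0, n - L + 1):
--                 pairs = []
--                 for k in range(1, L):
--                     for e1, v1 in rows[k - 1][i]:
--                         for e2, v2 in rows[L - k - 1][i + k]:
--                             pairs.append((f"({e1} + {e2})", v1 + v2))
--                             pairs.append((f"({e1} - {e2})", v1 - v2))
--                             pairs.append((f"({e1} * {e2})", v1 * v2))
--                 row.append(pairs)
--             rows.append(row)
--         full = rows[n - 1][0] if n >= 1 else []
--         for exp, val in full:
--             if val == target:
--                 if exp.startswith("(") and exp.endswith(")"):
--                     exp = exp[1:-1]
--                 return exp
--     return "Tidak ada formula yang cocok."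
-- ===== Notes on version B (the rewrite author's own statement) =====
-- stated objective: alternative
-- what changed: The recursive generator over sub-slices is replaced by an iterative bottom-up interval-DP table of (expr, value) pairs per slice, built length by length and scanned at the full slice, keeping the permutations loop and outer-paren stripping.
import Mathlib
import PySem

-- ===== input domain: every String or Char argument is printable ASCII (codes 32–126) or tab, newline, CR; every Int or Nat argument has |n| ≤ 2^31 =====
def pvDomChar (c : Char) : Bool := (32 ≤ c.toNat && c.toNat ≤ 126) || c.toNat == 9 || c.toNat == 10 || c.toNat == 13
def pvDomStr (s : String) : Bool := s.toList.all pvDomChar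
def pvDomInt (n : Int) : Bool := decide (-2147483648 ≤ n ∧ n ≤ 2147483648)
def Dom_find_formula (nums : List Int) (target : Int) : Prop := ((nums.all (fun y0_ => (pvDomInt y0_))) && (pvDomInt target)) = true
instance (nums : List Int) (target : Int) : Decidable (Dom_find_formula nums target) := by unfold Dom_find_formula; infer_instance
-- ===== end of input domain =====

-- B replaces the recursive expression generator by an iterative bottom-up interval-DP table (alternative decomposition, same enumeration order).

-- shared helper: both Pythons call itertools.permutations(nums) and do the same
-- outer-paren stripping 'exp[1:-1]' after the same startswith/endswith test.
def stripOuter (e : String) : String :=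
  if PySem.Str.startswith e "(" && PySem.Str.endswith e ")" then
    PySem.Str.slice e (some 1) (some (-1))
  else e

-- ===== PORT A =====
-- generate(nums): the list of pairs the generator yields, in yield order.
-- nums[:i] / nums[i:] with 0 ≤ i ≤ len are take/drop (PySem.List.slice_to_natCast /
-- slice_from_natCast); loop counter i ranges over range(1, len(nums)) = List.range' 1 (len-1).
def generateA (ys : List Int) : List (String × Int) :=
  if _h : ys.length = 1 then
    [(PySem.Int.toStr (ys.getD 0 0), ys.getD 0 0)]   -- nums[0] on a length-1 list
  else
    (List.range' 1 (ys.length - 1)).attach.flatMap (fun ⟨i, hi⟩ =>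
      (generateA (ys.take i)).flatMap (fun p1 =>
        (generateA (ys.drop i)).flatMap (fun p2 =>
          [("(" ++ p1.1 ++ " + " ++ p2.1 ++ ")", p1.2 + p2.2),
           ("(" ++ p1.1 ++ " - " ++ p2.1 ++ ")", p1.2 - p2.2),
           ("(" ++ p1.1 ++ " * " ++ p2.1 ++ ")", p1.2 * p2.2)])))
termination_by ys.length
decreasing_by
  · have := List.mem_range'.mp hi
    obtain ⟨k, hk, rfl⟩ := this
    simp; omega
  · have := List.mem_range'.mp hi
    obtain ⟨k, hk, rfl⟩ := this
    simp; omega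

-- the 'for perm in …: for exp, val in generate(perm): if val == target: …' loops
def loopA : List (List Int) → Int → String
  | [], _ => "Tidak ada formula yang cocok."
  | p :: rest, t =>
    match (generateA p).find? (fun pr => pr.2 == t) with
    | some pr => stripOuter pr.1
    | none => loopA rest t

def find_formula (nums : List Int) (target : Int) : String :=
  loopA (PySem.List.permutations nums nums.length) target

-- ===== PORT B =====
-- rows[L-1][i] = pairs for the slice xs[i:i+L]; cellB combines shorter rows.
def cellB (rows : List (List (List (String × Int)))) (i L : Nat) : List (String × Int) :=
  (List.range' 1 (L - 1)).flatMap (fun k =>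
    ((rows.getD (k - 1) []).getD i []).flatMap (fun p1 =>
      ((rows.getD (L - k - 1) []).getD (i + k) []).flatMap (fun p2 =>
        [("(" ++ p1.1 ++ " + " ++ p2.1 ++ ")", p1.2 + p2.2),
         ("(" ++ p1.1 ++ " - " ++ p2.1 ++ ")", p1.2 - p2.2),
         ("(" ++ p1.1 ++ " * " ++ p2.1 ++ ")", p1.2 * p2.2)])))

def rowB (rows : List (List (List (String × Int)))) (n L : Nat) : List (List (String × Int)) :=
  (List.range (n - L + 1)).map (fun i => cellB rows i L)

-- rows = [[[(str(x), x)] for x in xs]]; for L in range(2, n+1): rows.append(row)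
def tableB (xs : List Int) : List (List (List (String × Int))) :=
  (List.range' 2 (xs.length - 1)).foldl (fun rows L => rows ++ [rowB rows xs.length L])
    [xs.map (fun x => [(PySem.Int.toStr x, x)])]

-- full = rows[n-1][0] if n >= 1 else []
def topB (xs : List Int) : List (String × Int) :=
  if xs.length = 0 then [] else ((tableB xs).getD (xs.length - 1) []).getD 0 []

def loopB : List (List Int) → Int → String
  | [], _ => "Tidak ada formula yang cocok."
  | p :: rest, t =>
    match (topB p).find? (fun pr => pr.2 == t) with
    | some pr => stripOuter pr.1
    | none => loopB rest t

def find_formula_alt (nums : List Int) (target : Int) : String :=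
  loopB (PySem.List.permutations nums nums.length) target

-- ===== PRECONDITION & SPEC =====
def Spec_find_formula (nums : List Int) (target : Int) (out : String) : Prop := out = find_formula_alt nums target
instance (nums : List Int) (target : Int) (out : String) : Decidable (Spec_find_formula nums target out) := by unfold Spec_find_formula; infer_instance

-- ===== CLAIM (what is proved, stated in full; the proofs are below) =====
def Claim_equal_find_formula : Prop := ∀ (nums : List Int) (target : Int), Dom_find_formula nums target → Spec_find_formula nums target (find_formula nums target)

-- ===== LEMMAS AND PROOFS =====

-- the invariant of B's bottom-up table: rows has m levels and level ℓ, start i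
-- carries exactly the pairs A's generator yields for the slice xs[i:i+ℓ]
def Good (xs : List Int) (rows : List (List (List (String × Int)))) (m : Nat) : Prop :=
  rows.length = m ∧
  ∀ ℓ i : Nat, 1 ≤ ℓ → ℓ ≤ m → i + ℓ ≤ xs.length →
    ((rows.getD (ℓ - 1) []).getD i []) = generateA ((xs.drop i).take ℓ)

theorem flatMap_congr_mem {α β : Type} (l : List α) (f g : α → List β)
    (h : ∀ x ∈ l, f x = g x) : l.flatMap f = l.flatMap g := by
  induction l with
  | nil => rfl
  | cons a l ih =>
    simp only [List.flatMap_cons]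
    rw [h a (by simp), ih (fun x hx => h x (by simp [hx]))]

theorem generateA_of_len_one (x : Int) :
    generateA [x] = [(PySem.Int.toStr x, x)] := by
  rw [generateA]; simp

theorem generateA_eq_flatMap (ys : List Int) (h : ys.length ≠ 1) :
    generateA ys =
      (List.range' 1 (ys.length - 1)).flatMap (fun i =>
        (generateA (ys.take i)).flatMap (fun p1 =>
          (generateA (ys.drop i)).flatMap (fun p2 =>
            [("(" ++ p1.1 ++ " + " ++ p2.1 ++ ")", p1.2 + p2.2),
             ("(" ++ p1.1 ++ " - " ++ p2.1 ++ ")", p1.2 - p2.2),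
             ("(" ++ p1.1 ++ " * " ++ p2.1 ++ ")", p1.2 * p2.2)]))) := by
  rw [generateA]
  simp only [h, dite_false, List.flatMap_subtype, List.unattach_attach]

theorem good_base (xs : List Int) :
    Good xs [xs.map (fun x => [(PySem.Int.toStr x, x)])] 1 := by
  constructor
  · rfl
  · intro ℓ i h1 h2 h3
    have hℓ : ℓ = 1 := le_antisymm h2 h1
    subst hℓ
    have hi : i < xs.length := by omega
    have hslice : (xs.drop i).take 1 = [xs[i]] := by
      have : xs.drop i = xs[i] :: xs.drop (i + 1) := List.drop_eq_getElem_cons hi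
      rw [this]; rfl
    rw [hslice, generateA_of_len_one]
    simp [List.getD, List.getElem?_map, List.getElem?_eq_getElem hi]

theorem cellB_eq (xs : List Int) (rows : List (List (List (String × Int)))) (m : Nat)
    (hg : Good xs rows m) (i L : Nat) (h2 : 2 ≤ L) (hLm : L ≤ m + 1)
    (hiL : i + L ≤ xs.length) :
    cellB rows i L = generateA ((xs.drop i).take L) := by
  have hlen : ((xs.drop i).take L).length = L := by
    simp [List.length_take, List.length_drop]; omega
  rw [cellB, generateA_eq_flatMap _ (by omega), hlen]
  apply flatMap_congr_mem
  intro k hk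
  obtain ⟨j, hj, hkj⟩ := List.mem_range'.mp hk
  have hk1 : 1 ≤ k := by omega
  have hkL : k < L := by omega
  have hleft : ((rows.getD (k - 1) []).getD i []) = generateA (((xs.drop i).take L).take k) := by
    rw [hg.2 k i hk1 (by omega) (by omega)]
    congr 1
    rw [List.take_take]
    congr 1
    omega
  have hright : ((rows.getD (L - k - 1) []).getD (i + k) []) =
      generateA (((xs.drop i).take L).drop k) := by
    rw [hg.2 (L - k) (i + k) (by omega) (by omega) (by omega)]
    congr 1
    rw [List.drop_take, List.drop_drop]
  rw [hleft, hright]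

theorem good_step (xs : List Int) (rows : List (List (List (String × Int)))) (m : Nat)
    (hg : Good xs rows m) (hm : 1 ≤ m) :
    Good xs (rows ++ [rowB rows xs.length (m + 1)]) (m + 1) := by
  obtain ⟨hlen, hcell⟩ := hg
  constructor
  · simp [hlen]
  · intro ℓ i h1 h2 h3
    by_cases hℓ : ℓ ≤ m
    · have : (rows ++ [rowB rows xs.length (m + 1)]).getD (ℓ - 1) [] = rows.getD (ℓ - 1) [] := by
        simp [List.getD, List.getElem?_append_left (by omega : ℓ - 1 < rows.length)]
      rw [this]
      exact hcell ℓ i h1 hℓ h3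
    · have hℓ' : ℓ = m + 1 := by omega
      subst hℓ'
      have hrow : (rows ++ [rowB rows xs.length (m + 1)]).getD (m + 1 - 1) [] =
          rowB rows xs.length (m + 1) := by
        simp [List.getD, hlen]
      rw [hrow, rowB]
      have hi : i < xs.length - (m + 1) + 1 := by omega
      have : ((List.range (xs.length - (m + 1) + 1)).map
          (fun i => cellB rows i (m + 1))).getD i [] = cellB rows i (m + 1) := by
        simp [List.getD, List.getElem?_map, List.getElem?_range hi]
      rw [this]
      exact cellB_eq xs rows m ⟨hlen, hcell⟩ i (m + 1) (by omega) (by omega) h3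

theorem good_fold (xs : List Int) :
    ∀ (c : Nat) (rows : List (List (List (String × Int)))) (m : Nat),
      Good xs rows m → 1 ≤ m →
      Good xs ((List.range' (m + 1) c).foldl
        (fun rows L => rows ++ [rowB rows xs.length L]) rows) (m + c) := by
  intro c
  induction c with
  | zero => intro rows m hg _; simpa using hg
  | succ c ih =>
    intro rows m hg hm
    rw [List.range'_succ, List.foldl_cons]
    have := ih (rows ++ [rowB rows xs.length (m + 1)]) (m + 1) (good_step xs rows m hg hm) (by omega)
    have harr : m + 1 + c = m + (c + 1) := by omega
    rwa [harr] at this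

theorem topB_eq_generateA (xs : List Int) : topB xs = generateA xs := by
  rw [topB]
  by_cases h0 : xs.length = 0
  · rw [if_pos h0]
    rw [generateA_eq_flatMap _ (by omega)]
    rw [h0]
    rfl
  · rw [if_neg h0]
    have hn : 1 ≤ xs.length := by omega
    have hg := good_fold xs (xs.length - 1) [xs.map (fun x => [(PySem.Int.toStr x, x)])] 1
      (good_base xs) (le_refl 1)
    rw [tableB]
    have harr : 1 + (xs.length - 1) = xs.length := by omega
    rw [harr] at hg
    have := hg.2 xs.length 0 hn (le_refl _) (by omega)
    simpa using this

theorem loopA_eq_loopB : ∀ (ps : List (List Int)) (t : Int), loopA ps t = loopB ps t := by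
  intro ps
  induction ps with
  | nil => intro t; rfl
  | cons p rest ih =>
    intro t
    rw [loopA, loopB, topB_eq_generateA]
    cases (generateA p).find? (fun pr => pr.2 == t) with
    | none => simpa using ih t
    | some pr => rfl

-- ===== VERDICT (by name: the statement is the Claim_ definition above) =====
theorem find_formula_spec : Claim_equal_find_formula := by
  intro nums target _
  unfold Spec_find_formula find_formula find_formula_alt
  exact loopA_eq_loopB _ _
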